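-- pv_equiv track=rewrite | github.com/sirusw/canvas-gamification | course/question-analysis/get_submission.py | num_comment_lines
-- ===== SOURCE A (Python) =====
-- def num_comment_lines(string):
--     temp_list = string.split("\n")
--     num = 0
--     for i in temp_list:
--         tmp = i.strip()
--         if len(tmp) >= 2:
--             if tmp[0] == "/" and tmp[1] == "/":
--                 num += 1
--
--     return num
-- ===== SOURCE B (Python) =====
-- def num_comment_lines(string):
--     # Single index-based pass: skip each line's leading whitespace, test for
--     # "//", then jump to the next line. No list of lines, no per-line strip.
--     count = 0
--     i, n = 0, len(string)
--     while i < n: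
--         while i < n and string[i] != '\n' and string[i].isspace():
--             i += 1
--         if string.startswith('//', i):
--             count += 1
--         while i < n and string[i] != '\n':
--             i += 1
--         i += 1
--     return count
-- ===== Notes on version B (the rewrite author's own statement) =====
-- stated objective: alternative
-- what changed: Replaces split('\n') + per-line strip() with a single index-based scan that skips each line's leading whitespace, tests startswith('//', i) and jumps to the next newline, materializing no line list and no stripped copies.
import Mathlib
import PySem

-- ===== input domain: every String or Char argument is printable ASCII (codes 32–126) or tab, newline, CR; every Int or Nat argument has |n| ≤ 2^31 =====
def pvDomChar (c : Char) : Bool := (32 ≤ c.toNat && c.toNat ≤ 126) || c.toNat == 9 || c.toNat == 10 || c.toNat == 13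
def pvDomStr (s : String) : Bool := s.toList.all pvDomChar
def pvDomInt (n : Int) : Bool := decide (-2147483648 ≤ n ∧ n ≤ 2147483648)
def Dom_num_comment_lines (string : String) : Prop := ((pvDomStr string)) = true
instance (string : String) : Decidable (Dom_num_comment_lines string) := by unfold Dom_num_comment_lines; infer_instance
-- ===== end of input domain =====

-- B replaces A's split("\n") + per-line strip() with one index-based scan over the
-- string (skip leading whitespace, test "//", jump past the newline); alternative
-- decomposition, same asymptotic cost.


-- ===== PORT A =====
-- string.split("\n") → PySem.Chars.splitOn on the code points ("\n" ≠ "", so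
-- Python's split(sep) is exactly the splitOn form); i.strip() → PySem.Chars.strip;
-- tmp[0] == "/" → PySem.Chars.pyGet? tmp 0 = some '/'.
def num_comment_lines (string : String) : Int :=
  let temp_list := PySem.Chars.splitOn string.toList ['\n']
  temp_list.foldl (fun num i =>
    let tmp := PySem.Chars.strip i
    if 2 ≤ PySem.Chars.len tmp then
      if PySem.Chars.pyGet? tmp 0 = some '/' ∧ PySem.Chars.pyGet? tmp 1 = some '/' then num + 1
      else num
    else num) 0

-- ===== PORT B =====
-- inner while: 'while i < n and string[i] != '\n' and string[i].isspace(): i += 1'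
def nclSkipWs (cs : List Char) (i : Nat) : Nat :=
  if h : i < cs.length then
    if cs[i] ≠ '\n' ∧ PySem.Chars.isspace cs[i] then nclSkipWs cs (i + 1) else i
  else i
termination_by cs.length - i

-- inner while: 'while i < n and string[i] != '\n': i += 1'
def nclSkipLine (cs : List Char) (i : Nat) : Nat :=
  if h : i < cs.length then
    if cs[i] ≠ '\n' then nclSkipLine cs (i + 1) else i
  else i
termination_by cs.length - i

theorem nclSkipWs_le (cs : List Char) (i : Nat) : i ≤ nclSkipWs cs i := by
  fun_induction nclSkipWs <;> omega

theorem nclSkipLine_le (cs : List Char) (i : Nat) : i ≤ nclSkipLine cs i := by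
  fun_induction nclSkipLine <;> omega

-- outer while of B, with the running count; string.startswith('//', i) ported by
-- hand as ['/','/'].isPrefixOf (cs.drop i) (exact for the nonnegative i used here).
def nclLoop (cs : List Char) (i : Nat) (count : Int) : Int :=
  if i < cs.length then
    let j := nclSkipWs cs i
    let count' := if ['/', '/'].isPrefixOf (cs.drop j) then count + 1 else count
    nclLoop cs (nclSkipLine cs j + 1) count'
  else count
termination_by cs.length - i
decreasing_by
  have h1 := nclSkipWs_le cs i
  have h2 := nclSkipLine_le cs (nclSkipWs cs i)
  omega

def num_comment_lines_alt (string : String) : Int :=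
  nclLoop string.toList 0 0

-- ===== PRECONDITION & SPEC =====
def Spec_num_comment_lines (string : String) (out : Int) : Prop := out = num_comment_lines_alt string
instance (string : String) (out : Int) : Decidable (Spec_num_comment_lines string out) := by unfold Spec_num_comment_lines; infer_instance

-- ===== CLAIM (what is proved, stated in full; the proofs are below) =====
def Claim_equal_num_comment_lines : Prop := ∀ (string : String), Dom_num_comment_lines string → Spec_num_comment_lines string (num_comment_lines string)

-- ===== LEMMAS AND PROOFS =====

-- the per-line test of A, as a Bool predicate
def lineP (line : List Char) : Bool :=
  decide (2 ≤ PySem.Chars.len (PySem.Chars.strip line) ∧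
    PySem.Chars.pyGet? (PySem.Chars.strip line) 0 = some '/' ∧
    PySem.Chars.pyGet? (PySem.Chars.strip line) 1 = some '/')

-- structural recursion computing splitOn cs ['\n']
def linesAux : List Char → List (List Char)
  | [] => [[]]
  | c :: r =>
    let ls := linesAux r
    if c = '\n' then [] :: ls else (c :: ls.headI) :: ls.tail

theorem linesAux_ne_nil (l : List Char) : linesAux l ≠ [] := by
  cases l <;> simp [linesAux] <;> split <;> simp

theorem consHeadTail {α : Type} [Inhabited α] (l : List α) (h : l ≠ []) :
    l.headI :: l.tail = l := by cases l with | nil => exact absurd rfl h | cons a t => rfl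

theorem linesAux_go (fuel : Nat) (l cur : List Char) (acc : List (List Char))
    (h : l.length < fuel) :
    PySem.Chars.splitOn.go ['\n'] fuel l cur acc =
      acc.reverse ++ (cur.reverse ++ (linesAux l).headI) :: (linesAux l).tail := by
  induction fuel generalizing l cur acc with
  | zero => omega
  | succ f ih =>
    match l with
    | [] => simp [PySem.Chars.splitOn.go, linesAux]
    | c :: r =>
      by_cases hc : c = '\n'
      · subst hc
        rw [PySem.Chars.splitOn.go]
        simp only [List.isPrefixOf, beq_self_eq_true, Bool.true_and, if_pos]
        have hdrop : List.drop (['\n'].length) ('\n' :: r) = r := rfl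
        rw [hdrop, ih r [] (cur.reverse :: acc) (by simpa using Nat.lt_of_succ_lt_succ h)]
        simp [linesAux, consHeadTail _ (linesAux_ne_nil r)]
      · rw [PySem.Chars.splitOn.go]
        have hpre : (['\n'].isPrefixOf (c :: r)) = false := by
          simp [List.isPrefixOf]
          exact fun hh => absurd hh.symm hc
        simp only [hpre, Bool.false_eq_true, if_false]
        rw [ih r (c :: cur) acc (by simpa using Nat.lt_of_succ_lt_succ h)]
        simp [linesAux, hc]

theorem splitOn_eq_linesAux (cs : List Char) :
    PySem.Chars.splitOn cs ['\n'] = linesAux cs := by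
  have hne := linesAux_ne_nil cs
  rw [PySem.Chars.splitOn, linesAux_go (cs.length + 1) cs [] [] (by omega)]
  cases h : linesAux cs with
  | nil => exact absurd h hne
  | cons a t => simp

-- the line decomposition of linesAux
theorem linesAux_decomp (l : List Char) :
    linesAux l = l.takeWhile (· ≠ '\n') ::
      (match l.dropWhile (· ≠ '\n') with
       | [] => ([] : List (List Char))
       | _ :: r => linesAux r) := by
  induction l with
  | nil => simp [linesAux]
  | cons c r ih =>
    by_cases hc : c = '\n'
    · subst hc; simp [linesAux, List.takeWhile, List.dropWhile]
    · rw [show linesAux (c :: r) = (c :: (linesAux r).headI) :: (linesAux r).tail by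
        simp [linesAux, hc], ih]
      simp [List.takeWhile_cons, List.dropWhile_cons, hc]

-- A's foldl is the countP of lineP
theorem foldA (lines : List (List Char)) (acc : Int) :
    lines.foldl (fun num i =>
      let tmp := PySem.Chars.strip i
      if 2 ≤ PySem.Chars.len tmp then
        if PySem.Chars.pyGet? tmp 0 = some '/' ∧ PySem.Chars.pyGet? tmp 1 = some '/' then num + 1
        else num
      else num) acc = acc + (lines.countP lineP : Int) := by
  induction lines generalizing acc with
  | nil => simp
  | cons a t ih =>
    simp only [List.foldl_cons, List.countP_cons, ih]
    by_cases h1 : (2 : Int) ≤ ((PySem.Chars.strip a).length : Int) <;>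
      by_cases h2 : PySem.List.pyGet? (PySem.Chars.strip a) 0 = some '/' ∧
        PySem.List.pyGet? (PySem.Chars.strip a) 1 = some '/' <;>
      simp [lineP, h1, h2] <;> push_cast <;> omega

-- dropWhile composition: skipping a subset predicate first does not change dropWhile
theorem dropWhile_dropWhile {p q : Char → Bool} (hpq : ∀ c, p c = true → q c = true)
    (l : List Char) : (l.dropWhile p).dropWhile q = l.dropWhile q := by
  induction l with
  | nil => rfl
  | cons c r ih =>
    by_cases hp : p c
    · simp [List.dropWhile_cons, hp, hpq c hp, ih]
    · simp [List.dropWhile_cons, hp]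

def wsNotNl (c : Char) : Bool := c ≠ '\n' && PySem.Chars.isspace c

theorem drop_nclSkipWs (cs : List Char) (i : Nat) :
    cs.drop (nclSkipWs cs i) = (cs.drop i).dropWhile wsNotNl := by
  fun_induction nclSkipWs with
  | case1 i h hc ih =>
    rw [ih, List.drop_eq_getElem_cons h, List.dropWhile_cons]
    have : wsNotNl cs[i] = true := by simp [wsNotNl, hc.1, hc.2]
    simp [this]
  | case2 i h hc =>
    rw [List.drop_eq_getElem_cons h, List.dropWhile_cons]
    have hw : wsNotNl cs[i] = false := by
      simp only [wsNotNl, Bool.and_eq_false_iff]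
      rcases not_and_or.mp hc with h' | h'
      · left; simpa using h'
      · right; simpa using h'
    simp only [hw, Bool.false_eq_true, if_false]
  | case3 i h =>
    have : cs.drop i = [] := List.drop_eq_nil_of_le (by omega)
    simp [this]

theorem drop_nclSkipLine (cs : List Char) (i : Nat) :
    cs.drop (nclSkipLine cs i) = (cs.drop i).dropWhile (· ≠ '\n') := by
  fun_induction nclSkipLine with
  | case1 i h hc ih =>
    rw [ih, List.drop_eq_getElem_cons h, List.dropWhile_cons]
    simp [hc]
  | case2 i h hc =>
    rw [List.drop_eq_getElem_cons h, List.dropWhile_cons]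
    simp only [ne_eq, Decidable.not_not] at hc
    simp only [hc, decide_not, decide_true, Bool.not_true, Bool.false_eq_true, if_false]
  | case3 i h =>
    have : cs.drop i = [] := List.drop_eq_nil_of_le (by omega)
    simp [this]

-- rstrip keeps a leading non-space character
theorem rstrip_cons_not_space {c : Char} (hc : PySem.Chars.isspace c = false) (t : List Char) :
    PySem.Chars.rstrip (c :: t) = c :: PySem.Chars.rstrip t := by
  simp only [PySem.Chars.rstrip, List.reverse_cons, List.dropWhile_append]
  by_cases h : (t.reverse.dropWhile PySem.Chars.isspace).isEmpty
  · simp [h, List.dropWhile_cons, hc, List.isEmpty_iff.mp h]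
  · simp [h]

theorem rstrip_prefix (l : List Char) : PySem.Chars.rstrip l <+: l := by
  have h1 : (l.reverse.dropWhile PySem.Chars.isspace) <:+ l.reverse :=
    List.dropWhile_suffix _
  have h2 := List.reverse_prefix.mpr h1
  simpa [PySem.Chars.rstrip] using h2

-- a leading non-'/' character keeps rstrip's head (if any) from being '/'
theorem rstrip_head_ne {x : Char} (hx : x ≠ '/') (l : List Char) :
    (PySem.Chars.rstrip (x :: l))[0]? ≠ some '/' := by
  obtain ⟨t, ht⟩ := rstrip_prefix (x :: l)
  cases hr : PySem.Chars.rstrip (x :: l) with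
  | nil => simp
  | cons y ys =>
    rw [hr] at ht
    have : y = x := by
      have h0 := congrArg (fun l : List Char => l[0]?) ht
      simp at h0
      exact h0
    simp [this, hx]

-- the per-line key lemma: B's test after skipping whitespace equals A's strip-based test
theorem hit_eq_lineP (l : List Char) :
    ['/', '/'].isPrefixOf (l.dropWhile wsNotNl) = lineP (l.takeWhile (· ≠ '\n')) := by
  induction l with
  | nil => simp [lineP, PySem.Chars.strip, PySem.Chars.lstrip, PySem.Chars.rstrip, PySem.Chars.len]
  | cons c r ih =>
    by_cases hnl : c = '\n'
    · subst hnl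
      simp [List.dropWhile_cons, List.takeWhile_cons, wsNotNl, lineP,
        PySem.Chars.strip, PySem.Chars.lstrip, PySem.Chars.rstrip, PySem.Chars.len,
        List.isPrefixOf]
    · by_cases hsp : PySem.Chars.isspace c
      · have hw : wsNotNl c = true := by simp [wsNotNl, hnl, hsp]
        rw [List.dropWhile_cons_of_pos hw, ih]
        have : (c :: r).takeWhile (· ≠ '\n') = c :: r.takeWhile (· ≠ '\n') := by
          simp [List.takeWhile_cons, hnl]
        rw [this]
        simp [lineP, PySem.Chars.strip, PySem.Chars.lstrip, List.dropWhile_cons, hsp]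
      · have hw : wsNotNl c = false := by simp [wsNotNl, hsp]
        rw [List.dropWhile_cons_of_neg (by simp [hw])]
        have ht : (c :: r).takeWhile (· ≠ '\n') = c :: r.takeWhile (· ≠ '\n') := by
          simp [List.takeWhile_cons, hnl]
        rw [ht]
        have hsp' : PySem.Chars.isspace c = false := by simpa using hsp
        have hstrip : PySem.Chars.strip (c :: r.takeWhile (· ≠ '\n')) =
            c :: PySem.Chars.rstrip (r.takeWhile (· ≠ '\n')) := by
          simp [PySem.Chars.strip, PySem.Chars.lstrip, List.dropWhile_cons, hsp',
            rstrip_cons_not_space hsp']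
        by_cases hc : c = '/'
        · subst hc
          cases r with
          | nil => decide
          | cons d r' =>
            by_cases hdnl : d = '\n'
            · subst hdnl
              have h0 : List.takeWhile (fun x => decide (x ≠ '\n')) ('\n' :: r') = [] := by
                simp
              rw [h0]
              have hlhs : ['/', '/'].isPrefixOf ('/' :: '\n' :: r') = false := by
                simp [List.isPrefixOf]
              rw [hlhs]
              decide
            · have htd : (d :: r').takeWhile (· ≠ '\n') = d :: r'.takeWhile (· ≠ '\n') := by
                simp [List.takeWhile_cons, hdnl]
              rw [htd] at hstrip ⊢
              by_cases hds : d = '/'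
              · subst hds
                have hthis : PySem.Chars.rstrip ('/' :: r'.takeWhile (· ≠ '\n')) =
                    '/' :: PySem.Chars.rstrip (r'.takeWhile (· ≠ '\n')) :=
                  rstrip_cons_not_space (by decide) _
                generalize r'.takeWhile (· ≠ '\n') = t at hstrip hthis ⊢
                simp [lineP, hstrip, hthis, List.isPrefixOf, PySem.List.pyGet?,
                  PySem.List.pyIdx?]
                refine ⟨by omega, ?_⟩
                rw [if_pos (by positivity)]
                simp
              · have hne := rstrip_head_ne hds (r'.takeWhile (· ≠ '\n'))
                have hlhs : (['/', '/'].isPrefixOf ('/' :: d :: r')) = false := by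
                  simp [List.isPrefixOf]
                  exact fun hh => hds hh.symm
                rw [hlhs]
                generalize r'.takeWhile (· ≠ '\n') = t at hstrip hne
                cases hr : PySem.Chars.rstrip (d :: t) with
                | nil =>
                  rw [hr] at hstrip
                  simp [lineP, hstrip, hr, PySem.List.pyGet?, PySem.List.pyIdx?]
                | cons y ys =>
                  rw [hr] at hne hstrip
                  have hy : y ≠ '/' := by simpa using hne
                  simp [lineP, hstrip, PySem.List.pyGet?, PySem.List.pyIdx?, hy]
        · have hlhs : (['/', '/'].isPrefixOf (c :: r)) = false := by
            simp [List.isPrefixOf]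
            intro hh
            exact absurd hh.symm hc
          rw [hlhs]
          generalize r.takeWhile (· ≠ '\n') = t at hstrip
          simp [lineP, hstrip, PySem.List.pyGet?, PySem.List.pyIdx?, hc]

-- countP recurrence along the scan
theorem countP_linesAux (l : List Char) :
    ((linesAux l).countP lineP : Int) =
      (if ['/', '/'].isPrefixOf (l.dropWhile wsNotNl) then 1 else 0) +
      (match l.dropWhile (· ≠ '\n') with
       | [] => (0 : Int)
       | _ :: r => ((linesAux r).countP lineP : Int)) := by
  rw [linesAux_decomp l, hit_eq_lineP l]
  cases hd : l.dropWhile (· ≠ '\n') with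
  | nil => simp only [hd, List.countP_cons]; split <;> simp
  | cons a r => simp only [hd, List.countP_cons, List.countP_nil]; split <;> push_cast <;> omega

-- the main loop invariant
theorem nclLoop_eq (cs : List Char) (i : Nat) (count : Int) :
    nclLoop cs i count = count + ((linesAux (cs.drop i)).countP lineP : Int) := by
  fun_induction nclLoop with
  | case1 i count h j cnt ih =>
    rw [ih]
    have hws : List.drop j cs = List.dropWhile wsNotNl (List.drop i cs) := drop_nclSkipWs cs i
    have hln : List.drop (nclSkipLine cs j) cs = (List.drop i cs).dropWhile (· ≠ '\n') := by
      have h1 := drop_nclSkipLine cs j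
      rw [hws] at h1
      rw [h1, dropWhile_dropWhile (by intro c hc; simp [wsNotNl] at hc ⊢; simp [hc.1])]
    have hcnt : cnt = if ['/', '/'].isPrefixOf (List.dropWhile wsNotNl (List.drop i cs)) = true
        then count + 1 else count := by
      rw [← hws]
      exact dite_eq_ite
    rw [countP_linesAux (List.drop i cs), hcnt]
    cases hd : (List.drop i cs).dropWhile (· ≠ '\n') with
    | nil =>
      have hnil : List.drop (nclSkipLine cs j + 1) cs = [] := by
        rw [hd] at hln
        have h1 : cs.length ≤ nclSkipLine cs j := List.drop_eq_nil_iff.mp hln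
        exact List.drop_eq_nil_of_le (by omega)
      rw [hnil]
      have h0 : (linesAux []).countP lineP = 0 := by decide
      rw [h0]
      split <;> push_cast <;> ring
    | cons a r =>
      have hdrop : List.drop (nclSkipLine cs j + 1) cs = r := by
        rw [hd] at hln
        have h2 := congrArg List.tail hln
        rw [List.tail_drop] at h2
        simpa using h2
      rw [hdrop]
      split <;> push_cast <;> ring
  | case2 i count h =>
    have hnil : cs.drop i = [] := List.drop_eq_nil_of_le (by omega)
    rw [hnil]
    have h0 : (linesAux []).countP lineP = 0 := by decide
    rw [h0]
    simp

-- ===== VERDICT (by name: the statement is the Claim_ definition above) =====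
theorem num_comment_lines_spec : Claim_equal_num_comment_lines := by
  intro s _
  unfold Spec_num_comment_lines num_comment_lines num_comment_lines_alt
  rw [splitOn_eq_linesAux, foldA, nclLoop_eq]
  simp
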